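-- pv_equiv track=rewrite | github.com/Tim-Chen11/STG | etl_transform_enhanced.py | _detect_unit
-- ===== SOURCE A (Python) =====
-- from typing import Dict, List, Optional, Tuple, Set
--
-- def _detect_unit(col_name: str) -> Optional[str]:
--     """Detect unit from column name"""
--     col_lower = col_name.lower()
--     if any(x in col_lower for x in ["price", "value", "zhvi", "zori", "cost"]):
--         return "USD"
--     elif any(x in col_lower for x in ["percent", "pct", "share", "ratio"]):
--         return "percent"
--     elif any(x in col_lower for x in ["days", "dom"]):
--         return "days"
--     elif any(x in col_lower for x in ["count", "inventory", "listings"]):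
--         return "count"
--     return None
-- ===== SOURCE B (Python) =====
-- from typing import Optional
--
-- # Priority-indexed units; keyword table maps each keyword to its priority rank.
-- _UNITS = ["USD", "percent", "days", "count"]
-- _KW = [
--     ("price", 0), ("value", 0), ("zhvi", 0), ("zori", 0), ("cost", 0),
--     ("percent", 1), ("pct", 1), ("share", 1), ("ratio", 1),
--     ("days", 2), ("dom", 2),
--     ("count", 3), ("inventory", 3), ("listings", 3),
-- ]
--
-- def _detect_unit(col_name: str) -> Optional[str]:
--     # Single left-to-right scan over string positions, keeping the best
--     # (lowest) priority of any keyword that starts at the current position.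
--     s = col_name.lower()
--     best = 4
--     for i in range(len(s)):
--         for kw, pri in _KW:
--             if s.startswith(kw, i):
--                 best = min(best, pri)
--     return _UNITS[best] if best < 4 else None
-- ===== Notes on version B (the rewrite author's own statement) =====
-- stated objective: alternative
-- what changed: Instead of testing whole-string membership keyword group by keyword group, B makes a single left-to-right scan over string positions, checking which keywords start at each position and keeping the minimum priority rank, then maps the rank to its unit.
import Mathlib
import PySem

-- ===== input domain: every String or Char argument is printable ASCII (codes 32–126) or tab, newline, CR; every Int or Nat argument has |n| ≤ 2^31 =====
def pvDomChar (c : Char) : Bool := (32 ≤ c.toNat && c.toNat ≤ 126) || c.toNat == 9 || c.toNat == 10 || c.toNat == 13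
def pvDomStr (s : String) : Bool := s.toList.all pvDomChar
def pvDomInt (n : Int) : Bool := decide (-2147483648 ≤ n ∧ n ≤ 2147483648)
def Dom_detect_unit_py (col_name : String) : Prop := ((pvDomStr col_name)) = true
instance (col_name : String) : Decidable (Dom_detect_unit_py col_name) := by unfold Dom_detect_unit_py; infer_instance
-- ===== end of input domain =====

-- B replaces A's keyword-group membership tests by a single position scan keeping the minimum priority rank (alternative).

-- ===== PORT A =====
def detect_unit_py (col_name : String) : Option String :=
  let col_lower := PySem.Str.lower col_name
  if (["price", "value", "zhvi", "zori", "cost"].any fun x => PySem.Str.isIn x col_lower) then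
    some "USD"
  else if (["percent", "pct", "share", "ratio"].any fun x => PySem.Str.isIn x col_lower) then
    some "percent"
  else if (["days", "dom"].any fun x => PySem.Str.isIn x col_lower) then
    some "days"
  else if (["count", "inventory", "listings"].any fun x => PySem.Str.isIn x col_lower) then
    some "count"
  else
    none

-- ===== PORT B =====
def unitsTable : List String := ["USD", "percent", "days", "count"]

def kwTable : List (List Char × Nat) :=
  [(['p','r','i','c','e'], 0), (['v','a','l','u','e'], 0), (['z','h','v','i'], 0),
   (['z','o','r','i'], 0), (['c','o','s','t'], 0),
   (['p','e','r','c','e','n','t'], 1), (['p','c','t'], 1), (['s','h','a','r','e'], 1),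
   (['r','a','t','i','o'], 1),
   (['d','a','y','s'], 2), (['d','o','m'], 2),
   (['c','o','u','n','t'], 3), (['i','n','v','e','n','t','o','r','y'], 3),
   (['l','i','s','t','i','n','g','s'], 3)]

-- s.startswith(kw, i) with 0 ≤ i and no end bound equals (s.drop i).startswith(kw): exact here since i ranges over 0..len-1.
def detect_unit_py_alt (col_name : String) : Option String :=
  let s := PySem.Chars.lower col_name.toList
  let best : Nat := (PySem.List.pyRange 0 (s.length : Int) 1).foldl
    (fun best i => kwTable.foldl
      (fun b p => if PySem.Chars.startswith (s.drop i.toNat) p.1 then min b p.2 else b) best) 4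
  if best < 4 then unitsTable[best]? else none

-- ===== PRECONDITION & SPEC =====
def Spec_detect_unit_py (col_name : String) (out : Option String) : Prop := out = detect_unit_py_alt col_name
instance (col_name : String) (out : Option String) : Decidable (Spec_detect_unit_py col_name out) := by unfold Spec_detect_unit_py; infer_instance

-- ===== CLAIM (what is proved, stated in full; the proofs are below) =====
def Claim_equal_detect_unit_py : Prop := ∀ (col_name : String), Dom_detect_unit_py col_name → Spec_detect_unit_py col_name (detect_unit_py col_name)

-- ===== LEMMAS AND PROOFS =====

-- Proof-side name for B's accumulated best value.
def bestOf (s : List Char) : Nat :=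
  (PySem.List.pyRange 0 (s.length : Int) 1).foldl
    (fun best i => kwTable.foldl
      (fun b p => if PySem.Chars.startswith (s.drop i.toNat) p.1 then min b p.2 else b) best) 4

theorem alt_eq (col_name : String) :
    detect_unit_py_alt col_name =
      if bestOf (PySem.Chars.lower col_name.toList) < 4 then
        unitsTable[bestOf (PySem.Chars.lower col_name.toList)]? else none := rfl

-- Inner fold (over the keyword table) reaches ≤ k iff the initial value is ≤ k or
-- some listed keyword starting at this position has priority ≤ k.
theorem inner_le_iff (l : List (List Char × Nat)) (t : List Char) (b k : Nat) :
    l.foldl (fun b p => if PySem.Chars.startswith t p.1 then min b p.2 else b) b ≤ k ↔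
    (b ≤ k ∨ ∃ p ∈ l, PySem.Chars.startswith t p.1 = true ∧ p.2 ≤ k) := by
  induction l generalizing b with
  | nil => simp
  | cons p l ih =>
    simp only [List.foldl_cons]
    by_cases h : PySem.Chars.startswith t p.1 = true
    · rw [if_pos h, ih]
      constructor
      · rintro (hb | hp)
        · rcases min_le_iff.mp hb with h1 | h1
          · exact Or.inl h1
          · exact Or.inr ⟨p, List.mem_cons_self, h, h1⟩
        · obtain ⟨q, hq, hs, hk⟩ := hp
          exact Or.inr ⟨q, List.mem_cons_of_mem _ hq, hs, hk⟩
      · rintro (hb | ⟨q, hq, hs, hk⟩)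
        · exact Or.inl (le_trans (Nat.min_le_left _ _) hb)
        · rcases List.mem_cons.mp hq with rfl | hq
          · exact Or.inl (le_trans (Nat.min_le_right _ _) hk)
          · exact Or.inr ⟨q, hq, hs, hk⟩
    · rw [if_neg h, ih]
      constructor
      · rintro (hb | ⟨q, hq, hs, hk⟩)
        · exact Or.inl hb
        · exact Or.inr ⟨q, List.mem_cons_of_mem _ hq, hs, hk⟩
      · rintro (hb | ⟨q, hq, hs, hk⟩)
        · exact Or.inl hb
        · rcases List.mem_cons.mp hq with rfl | hq
          · exact absurd hs h
          · exact Or.inr ⟨q, hq, hs, hk⟩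

-- Outer fold (over positions) reaches ≤ k iff the initial value is ≤ k or some
-- keyword of priority ≤ k starts at one of the listed positions.
theorem outer_le_iff (s : List Char) (l : List Int) (b k : Nat) :
    l.foldl (fun best i => kwTable.foldl
      (fun b p => if PySem.Chars.startswith (s.drop i.toNat) p.1 then min b p.2 else b) best) b ≤ k ↔
    (b ≤ k ∨ ∃ i ∈ l, ∃ p ∈ kwTable, PySem.Chars.startswith (s.drop i.toNat) p.1 = true ∧ p.2 ≤ k) := by
  induction l generalizing b with
  | nil => simp
  | cons i l ih =>
    simp only [List.foldl_cons]
    rw [ih]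
    constructor
    · rintro (hb | hp)
      · rcases (inner_le_iff kwTable (s.drop i.toNat) b k).mp hb with h1 | ⟨q, hq, hs, hk⟩
        · exact Or.inl h1
        · exact Or.inr ⟨i, List.mem_cons_self, q, hq, hs, hk⟩
      · obtain ⟨j, hj, q, hq, hs, hk⟩ := hp
        exact Or.inr ⟨j, List.mem_cons_of_mem _ hj, q, hq, hs, hk⟩
    · rintro (hb | ⟨j, hj, q, hq, hs, hk⟩)
      · exact Or.inl ((inner_le_iff kwTable (s.drop i.toNat) b k).mpr (Or.inl hb))
      · rcases List.mem_cons.mp hj with rfl | hj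
        · exact Or.inl ((inner_le_iff kwTable (s.drop j.toNat) b k).mpr
            (Or.inr ⟨q, hq, hs, hk⟩))
        · exact Or.inr ⟨j, hj, q, hq, hs, hk⟩

-- A nonempty keyword starts at some position of the range 0..len-1 iff it is a substring.
theorem exists_pos_iff_isIn (s kw : List Char) (hkw : kw ≠ []) :
    (∃ i ∈ PySem.List.pyRange 0 (s.length : Int) 1,
      PySem.Chars.startswith (s.drop i.toNat) kw = true) ↔ PySem.Chars.isIn kw s = true := by
  rw [← PySem.Chars.exists_prefix_drop_iff_isIn]
  constructor
  · rintro ⟨i, hi, hs⟩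
    exact ⟨i.toNat, (PySem.Chars.startswith_iff _ _).mp hs⟩
  · rintro ⟨j, hj⟩
    have hjlt : j < s.length := by
      by_contra h
      push_neg at h
      rw [List.drop_eq_nil_of_le h] at hj
      exact hkw (List.prefix_nil.mp hj)
    refine ⟨(j : Int), ?_, ?_⟩
    · rw [PySem.List.mem_pyRange_one]
      constructor
      · exact Int.natCast_nonneg j
      · exact_mod_cast hjlt
    · rw [Int.toNat_natCast]
      exact (PySem.Chars.startswith_iff _ _).mpr hj

-- Characterisation of B's accumulated best value: best ≤ k iff some keyword of
-- priority ≤ k occurs in s.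
theorem best_le_iff (s : List Char) (k : Nat) (hk : k < 4) :
    bestOf s ≤ k ↔
    (∃ p ∈ kwTable, PySem.Chars.isIn p.1 s = true ∧ p.2 ≤ k) := by
  rw [bestOf, outer_le_iff]
  constructor
  · rintro (h4 | ⟨i, hi, q, hq, hs, hqk⟩)
    · omega
    · have hne : q.1 ≠ [] := by
        fin_cases hq <;> simp
      exact ⟨q, hq, (exists_pos_iff_isIn s q.1 hne).mp ⟨i, hi, hs⟩, hqk⟩
  · rintro ⟨q, hq, hin, hqk⟩
    have hne : q.1 ≠ [] := by
      fin_cases hq <;> simp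
    obtain ⟨i, hi, hs⟩ := (exists_pos_iff_isIn s q.1 hne).mpr hin
    exact Or.inr ⟨i, hi, q, hq, hs, hqk⟩

-- best ≤ 4 always (the initial value is 4 and the fold only decreases it).
theorem best_le_four (s : List Char) : bestOf s ≤ 4 := by
  rw [bestOf]
  exact (outer_le_iff s _ 4 4).mpr (Or.inl le_rfl)

-- ===== VERDICT (by name: the statement is the Claim_ definition above) =====
set_option maxHeartbeats 1600000 in
theorem detect_unit_py_spec : Claim_equal_detect_unit_py := by
  intro col_name _
  unfold Spec_detect_unit_py detect_unit_py
  rw [alt_eq]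
  set s := PySem.Chars.lower col_name.toList with hs
  set best := bestOf s with hbest
  have hle0 := best_le_iff s 0 (by omega)
  have hle1 := best_le_iff s 1 (by omega)
  have hle2 := best_le_iff s 2 (by omega)
  have hle3 := best_le_iff s 3 (by omega)
  have hle4 := best_le_four s
  rw [← hbest] at hle0 hle1 hle2 hle3 hle4
  by_cases h0 : PySem.Chars.isIn ['p','r','i','c','e'] s = true
  · have : best ≤ 0 := hle0.mpr ⟨(['p','r','i','c','e'], 0), by simp [kwTable], by simpa using h0, le_rfl⟩
    have hb : best = 0 := by omega
    rw [hb]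
    simp [PySem.Str.isIn, PySem.Str.lower, ← hs, h0, unitsTable]
  by_cases h1 : PySem.Chars.isIn ['v','a','l','u','e'] s = true
  · have : best ≤ 0 := hle0.mpr ⟨(['v','a','l','u','e'], 0), by simp [kwTable], by simpa using h1, le_rfl⟩
    have hb : best = 0 := by omega
    rw [hb]
    simp [PySem.Str.isIn, PySem.Str.lower, ← hs, h0, h1, unitsTable]
  by_cases h2 : PySem.Chars.isIn ['z','h','v','i'] s = true
  · have : best ≤ 0 := hle0.mpr ⟨(['z','h','v','i'], 0), by simp [kwTable], by simpa using h2, le_rfl⟩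
    have hb : best = 0 := by omega
    rw [hb]
    simp [PySem.Str.isIn, PySem.Str.lower, ← hs, h0, h1, h2, unitsTable]
  by_cases h3 : PySem.Chars.isIn ['z','o','r','i'] s = true
  · have : best ≤ 0 := hle0.mpr ⟨(['z','o','r','i'], 0), by simp [kwTable], by simpa using h3, le_rfl⟩
    have hb : best = 0 := by omega
    rw [hb]
    simp [PySem.Str.isIn, PySem.Str.lower, ← hs, h0, h1, h2, h3, unitsTable]
  by_cases h4 : PySem.Chars.isIn ['c','o','s','t'] s = true
  · have : best ≤ 0 := hle0.mpr ⟨(['c','o','s','t'], 0), by simp [kwTable], by simpa using h4, le_rfl⟩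
    have hb : best = 0 := by omega
    rw [hb]
    simp [PySem.Str.isIn, PySem.Str.lower, ← hs, h0, h1, h2, h3, h4, unitsTable]
  have hn0 : ¬ best ≤ 0 := by
    intro h
    rcases hle0.mp h with ⟨q, hq, hin, hk⟩
    simp only [kwTable, List.mem_cons, List.not_mem_nil, or_false] at hq
    rcases hq with rfl|rfl|rfl|rfl|rfl|rfl|rfl|rfl|rfl|rfl|rfl|rfl|rfl|rfl <;>
      simp_all
  by_cases h5 : PySem.Chars.isIn ['p','e','r','c','e','n','t'] s = true
  · have : best ≤ 1 := hle1.mpr ⟨(['p','e','r','c','e','n','t'], 1), by simp [kwTable], by simpa using h5, le_rfl⟩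
    have hb : best = 1 := by omega
    rw [hb]
    simp [PySem.Str.isIn, PySem.Str.lower, ← hs, h0, h1, h2, h3, h4, h5, unitsTable]
  by_cases h6 : PySem.Chars.isIn ['p','c','t'] s = true
  · have : best ≤ 1 := hle1.mpr ⟨(['p','c','t'], 1), by simp [kwTable], by simpa using h6, le_rfl⟩
    have hb : best = 1 := by omega
    rw [hb]
    simp [PySem.Str.isIn, PySem.Str.lower, ← hs, h0, h1, h2, h3, h4, h5, h6, unitsTable]
  by_cases h7 : PySem.Chars.isIn ['s','h','a','r','e'] s = true
  · have : best ≤ 1 := hle1.mpr ⟨(['s','h','a','r','e'], 1), by simp [kwTable], by simpa using h7, le_rfl⟩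
    have hb : best = 1 := by omega
    rw [hb]
    simp [PySem.Str.isIn, PySem.Str.lower, ← hs, h0, h1, h2, h3, h4, h5, h6, h7, unitsTable]
  by_cases h8 : PySem.Chars.isIn ['r','a','t','i','o'] s = true
  · have : best ≤ 1 := hle1.mpr ⟨(['r','a','t','i','o'], 1), by simp [kwTable], by simpa using h8, le_rfl⟩
    have hb : best = 1 := by omega
    rw [hb]
    simp [PySem.Str.isIn, PySem.Str.lower, ← hs, h0, h1, h2, h3, h4, h5, h6, h7, h8, unitsTable]
  have hn1 : ¬ best ≤ 1 := by
    intro h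
    rcases hle1.mp h with ⟨q, hq, hin, hk⟩
    simp only [kwTable, List.mem_cons, List.not_mem_nil, or_false] at hq
    rcases hq with rfl|rfl|rfl|rfl|rfl|rfl|rfl|rfl|rfl|rfl|rfl|rfl|rfl|rfl <;>
      simp_all
  by_cases h9 : PySem.Chars.isIn ['d','a','y','s'] s = true
  · have : best ≤ 2 := hle2.mpr ⟨(['d','a','y','s'], 2), by simp [kwTable], by simpa using h9, le_rfl⟩
    have hb : best = 2 := by omega
    rw [hb]
    simp [PySem.Str.isIn, PySem.Str.lower, ← hs, h0, h1, h2, h3, h4, h5, h6, h7, h8, h9, unitsTable]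
  by_cases h10 : PySem.Chars.isIn ['d','o','m'] s = true
  · have : best ≤ 2 := hle2.mpr ⟨(['d','o','m'], 2), by simp [kwTable], by simpa using h10, le_rfl⟩
    have hb : best = 2 := by omega
    rw [hb]
    simp [PySem.Str.isIn, PySem.Str.lower, ← hs, h0, h1, h2, h3, h4, h5, h6, h7, h8, h9, h10, unitsTable]
  have hn2 : ¬ best ≤ 2 := by
    intro h
    rcases hle2.mp h with ⟨q, hq, hin, hk⟩
    simp only [kwTable, List.mem_cons, List.not_mem_nil, or_false] at hq
    rcases hq with rfl|rfl|rfl|rfl|rfl|rfl|rfl|rfl|rfl|rfl|rfl|rfl|rfl|rfl <;>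
      simp_all
  by_cases h11 : PySem.Chars.isIn ['c','o','u','n','t'] s = true
  · have : best ≤ 3 := hle3.mpr ⟨(['c','o','u','n','t'], 3), by simp [kwTable], by simpa using h11, le_rfl⟩
    have hb : best = 3 := by omega
    rw [hb]
    simp [PySem.Str.isIn, PySem.Str.lower, ← hs, h0, h1, h2, h3, h4, h5, h6, h7, h8, h9, h10, h11, unitsTable]
  by_cases h12 : PySem.Chars.isIn ['i','n','v','e','n','t','o','r','y'] s = true
  · have : best ≤ 3 := hle3.mpr ⟨(['i','n','v','e','n','t','o','r','y'], 3), by simp [kwTable], by simpa using h12, le_rfl⟩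
    have hb : best = 3 := by omega
    rw [hb]
    simp [PySem.Str.isIn, PySem.Str.lower, ← hs, h0, h1, h2, h3, h4, h5, h6, h7, h8, h9, h10, h11, h12, unitsTable]
  by_cases h13 : PySem.Chars.isIn ['l','i','s','t','i','n','g','s'] s = true
  · have : best ≤ 3 := hle3.mpr ⟨(['l','i','s','t','i','n','g','s'], 3), by simp [kwTable], by simpa using h13, le_rfl⟩
    have hb : best = 3 := by omega
    rw [hb]
    simp [PySem.Str.isIn, PySem.Str.lower, ← hs, h0, h1, h2, h3, h4, h5, h6, h7, h8, h9, h10, h11, h12, h13, unitsTable]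
  have hn3 : ¬ best ≤ 3 := by
    intro h
    rcases hle3.mp h with ⟨q, hq, hin, hk⟩
    simp only [kwTable, List.mem_cons, List.not_mem_nil, or_false] at hq
    rcases hq with rfl|rfl|rfl|rfl|rfl|rfl|rfl|rfl|rfl|rfl|rfl|rfl|rfl|rfl <;>
      simp_all
  have hb : best = 4 := by omega
  rw [hb]
  simp [PySem.Str.isIn, PySem.Str.lower, ← hs, h0, h1, h2, h3, h4, h5, h6, h7, h8, h9, h10, h11, h12, h13]
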